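-- pv_equiv track=rewrite | github.com/joshuatshirley/IngestForge | ingestforge/discovery/crossref.py | _clean_doi
-- ===== SOURCE A (Python) =====
-- from typing import Any, Dict, List, Optional
--
-- def _clean_doi(doi: str) -> Optional[str]:
--     """Clean and validate DOI.
--
--     Accepts formats:
--     - 10.1234/example
--     - https://doi.org/10.1234/example
--     - doi:10.1234/example
--     """
--     if not doi:
--         return None
--
--     # Remove common prefixes
--     clean = doi.strip()
--     prefixes = ["https://doi.org/", "http://doi.org/", "doi:", "DOI:"]
--     for prefix in prefixes:
--         if clean.startswith(prefix):
--             clean = clean[len(prefix) :]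
--             break
--
--     # Validate DOI format (must start with 10.)
--     if not clean.startswith("10."):
--         return None
--
--     return clean
-- ===== SOURCE B (Python) =====
-- def _clean_doi(doi: str) -> "Optional[str]":
--     """Clean and validate DOI: locate the '10.' core with find() and accept
--     iff the text before it is exactly one known head (or nothing)."""
--     if not doi:
--         return None
--     s = doi.strip()
--     i = s.find("10.")
--     if i < 0:
--         return None
--     if s[:i] in ("", "doi:", "DOI:", "http://doi.org/", "https://doi.org/"):
--         return s[i:]
--     return None
-- ===== Notes on version B (the rewrite author's own statement) =====
-- stated objective: alternative
-- what changed: B does not strip prefixes at all: it locates the first occurrence of the required '10.' core with str.find and accepts iff the text before that position is exactly one of the known heads (or empty), instead of A's loop that strips the first matching prefix and then separately validates the remainder; correctness rests on the heads containing no '1', so the core can never start inside a head.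
import Mathlib
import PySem

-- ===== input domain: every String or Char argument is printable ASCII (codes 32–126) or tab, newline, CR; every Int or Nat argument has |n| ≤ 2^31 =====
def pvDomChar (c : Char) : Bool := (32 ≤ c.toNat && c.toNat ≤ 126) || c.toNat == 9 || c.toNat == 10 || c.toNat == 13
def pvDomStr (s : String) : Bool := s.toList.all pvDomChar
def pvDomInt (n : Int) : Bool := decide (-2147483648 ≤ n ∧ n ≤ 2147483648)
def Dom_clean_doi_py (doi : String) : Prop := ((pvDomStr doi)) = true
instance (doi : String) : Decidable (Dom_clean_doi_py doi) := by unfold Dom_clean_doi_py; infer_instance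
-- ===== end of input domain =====

-- B replaces A's strip-one-prefix-then-validate loop by locating the '10.' core
-- with find() and accepting iff the text before it is a known head (alternative, same cost).

-- ===== PORT A =====
def pvPrefixesA : List String := ["https://doi.org/", "http://doi.org/", "doi:", "DOI:"]
def pvStripFirst : List String → String → String
  | [], clean => clean
  | p :: ps, clean =>
    if PySem.Str.startswith clean p then
      PySem.Str.slice clean (some (p.length : Int)) none
    else pvStripFirst ps clean

def clean_doi_py (doi : String) : Option String :=
  if doi = "" then none
  else
    let clean := PySem.Str.strip doi
    let clean := pvStripFirst pvPrefixesA clean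
    if PySem.Str.startswith clean "10." then some clean else none

-- ===== PORT B =====
def pvDoiHeads : List String := ["", "doi:", "DOI:", "http://doi.org/", "https://doi.org/"]
def pvAltBody (s : String) : Option String :=
  let i := PySem.Str.find s "10."
  if i < 0 then none
  else if pvDoiHeads.contains (PySem.Str.slice s none (some i)) then
    some (PySem.Str.slice s (some i) none)
  else none

def clean_doi_py_alt (doi : String) : Option String :=
  if doi = "" then none
  else pvAltBody (PySem.Str.strip doi)

-- ===== PRECONDITION & SPEC =====
def Spec_clean_doi_py (doi : String) (out : Option String) : Prop := out = clean_doi_py_alt doi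
instance (doi : String) (out : Option String) : Decidable (Spec_clean_doi_py doi out) := by unfold Spec_clean_doi_py; infer_instance

-- ===== CLAIM (what is proved, stated in full; the proofs are below) =====
def Claim_equal_clean_doi_py : Prop := ∀ (doi : String), Dom_clean_doi_py doi → Spec_clean_doi_py doi (clean_doi_py doi)

-- ===== LEMMAS AND PROOFS =====
theorem pv_sw_iff (s p : String) :
    PySem.Str.startswith s p = true ↔ p.toList <+: s.toList := by
  simp [PySem.Chars.startswith_iff]

theorem pv_find_first (l sub : List Char) (n : Nat)
    (h1 : sub <+: l.drop n) (h2 : ∀ j < n, ¬ sub <+: l.drop j) :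
    PySem.Chars.find l sub = (n : Int) := by
  have hnn : 0 ≤ PySem.Chars.find l sub := by
    rw [PySem.Chars.find_nonneg_iff]
    exact (PySem.Chars.isIn_iff_infix (sub := sub) (s := l)).mp
      ((PySem.Chars.exists_prefix_drop_iff_isIn (s := l) (sub := sub)).mp ⟨n, h1⟩)
  obtain ⟨hp, hmin⟩ := PySem.Chars.find_spec (s := l) (sub := sub) hnn
  have hne1 : ¬ (PySem.Chars.find l sub).toNat < n := fun h => h2 _ h hp
  have hne2 : ¬ n < (PySem.Chars.find l sub).toNat := fun h => hmin n h h1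
  omega

theorem pv_head_one (p r : List Char) (j : Nat) (hj : j < p.length)
    (h : ['1','0','.'] <+: (p ++ r).drop j) : '1' ∈ p := by
  rw [List.drop_append_of_le_length (Nat.le_of_lt hj)] at h
  obtain ⟨t, ht⟩ := h
  have h0 : (p.drop j ++ r)[0]? = some '1' := by
    rw [← ht]; rfl
  rw [List.getElem?_append, if_pos (by simp; omega), List.getElem?_drop] at h0
  simp only [Nat.add_zero] at h0
  exact List.mem_of_getElem? h0

theorem pv_len_le (l : List Char) (n : Nat) (h : ['1','0','.'] <+: l.drop n) :
    n ≤ l.length := by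
  have := h.length_le
  simp at this; omega

-- the matched-prefix case: if s starts with head p (no '1' in p, no other nonempty
-- head extends p), A's strip-then-check equals B's find-then-check
theorem pv_toList_inj (a b : String) (h : a.toList = b.toList) : a = b := by
  have := congrArg String.ofList h
  simpa using this

theorem pv_matched (s p : String)
    (hmem : p ∈ pvDoiHeads)
    (hone : '1' ∉ p.toList)
    (hnp : ∀ q ∈ pvDoiHeads, q ≠ "" → q ≠ p → ¬ p.toList <+: q.toList)
    (hsw : PySem.Str.startswith s p = true) :
    (if PySem.Str.startswith (PySem.Str.slice s (some (p.length : Int)) none) "10." then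
        some (PySem.Str.slice s (some (p.length : Int)) none) else none)
      = pvAltBody s := by
  have hpre : p.toList <+: s.toList := (pv_sw_iff s p).mp hsw
  have hlen : p.toList.length ≤ s.toList.length := hpre.length_le
  have hple : p.toList.length = p.length := by simp
  have hsplit : s.toList = p.toList ++ s.toList.drop p.toList.length := by
    conv_lhs => rw [← List.take_append_drop p.toList.length s.toList]
    congr 1
    exact (List.prefix_iff_eq_take.mp hpre).symm
  set r := s.toList.drop p.toList.length with hr
  have hsliceF : (PySem.Str.slice s (some (p.length : Int)) none).toList = r := by
    have h1 : (PySem.Str.slice s (some (p.length : Int)) none).toList = s.toList.drop p.length := by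
      simp [PySem.Str.toList_slice, PySem.List.slice_from_natCast]
    rw [h1, hr, hple]
  have h103 : ("10." : String).toList = ['1','0','.'] := by decide
  by_cases hc : ['1','0','.'] <+: r
  · -- rest starts with "10.": find s "10." = |p| and the head check passes
    have hfind : PySem.Chars.find s.toList ['1','0','.'] = (p.length : Int) := by
      rw [← hple]
      apply pv_find_first
      · rw [← hr]; exact hc
      · intro j hj hpj
        rw [hsplit] at hpj
        exact hone (pv_head_one _ _ _ hj hpj)
    have hswr : PySem.Str.startswith (PySem.Str.slice s (some (p.length : Int)) none) "10." = true := by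
      rw [pv_sw_iff, hsliceF, h103]; exact hc
    have htake : (PySem.Str.slice s none (some (p.length : Int))).toList = p.toList := by
      have h1 : (PySem.Str.slice s none (some (p.length : Int))).toList = s.toList.take p.length := by
        simp [PySem.Str.toList_slice, PySem.List.slice_to_natCast]
      rw [h1, ← hple]
      conv_lhs => rw [hsplit]
      exact List.take_left' rfl
    have hstr : PySem.Str.slice s none (some (p.length : Int)) = p := pv_toList_inj _ _ htake
    have hnneg : ¬ ((p.length : Int) < 0) := by omega
    have hcp : pvDoiHeads.contains p = true := List.contains_iff_mem.mpr hmem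
    unfold pvAltBody
    simp only [PySem.Str.find_eq, h103, hfind, hswr, if_true, if_neg hnneg, hstr, hcp]
  · -- rest does not start with "10.": both sides none
    have hswr : PySem.Str.startswith (PySem.Str.slice s (some (p.length : Int)) none) "10." = false := by
      rw [Bool.eq_false_iff, Ne, pv_sw_iff, hsliceF, h103]
      exact hc
    rw [hswr]
    simp only [Bool.false_eq_true, if_false]
    unfold pvAltBody
    simp only [PySem.Str.find_eq, h103]
    by_cases hneg : PySem.Chars.find s.toList ['1','0','.'] < 0
    · rw [if_pos hneg]
    · rw [if_neg hneg]
      have hnn : 0 ≤ PySem.Chars.find s.toList ['1','0','.'] := by omega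
      obtain ⟨hp0, hmin⟩ := PySem.Chars.find_spec (s := s.toList) (sub := ['1','0','.']) hnn
      set n := (PySem.Chars.find s.toList ['1','0','.']).toNat with hn
      have hfn : PySem.Chars.find s.toList ['1','0','.'] = (n : Int) := by omega
      have hnle : n ≤ s.toList.length := pv_len_le _ _ hp0
      have hngt : p.toList.length < n := by
        rcases Nat.lt_trichotomy n p.toList.length with h | h | h
        · refine absurd (pv_head_one p.toList r n h ?_) hone
          rw [← hsplit]; exact hp0
        · refine absurd ?_ hc
          rw [hr, ← h]; exact hp0
        · exact h
      have htake : (PySem.Str.slice s none (some ((n : Nat) : Int))).toList = s.toList.take n := by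
        simp [PySem.Str.toList_slice, PySem.List.slice_to_natCast]
      have hcont : pvDoiHeads.contains (PySem.Str.slice s none (some ((n : Nat) : Int))) = false := by
        rw [Bool.eq_false_iff, Ne]
        intro h
        have hx : PySem.Str.slice s none (some ((n : Nat) : Int)) ∈ pvDoiHeads :=
          List.contains_iff_mem.mp h
        have hqlen : (PySem.Str.slice s none (some ((n : Nat) : Int))).toList.length = n := by
          rw [htake, List.length_take]; omega
        have hqpre : (PySem.Str.slice s none (some ((n : Nat) : Int))).toList <+: s.toList := by
          rw [htake]; exact List.take_prefix _ _
        have hqne : PySem.Str.slice s none (some ((n : Nat) : Int)) ≠ "" := by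
          intro he; rw [he] at hqlen; simp at hqlen; omega
        have hqnp : PySem.Str.slice s none (some ((n : Nat) : Int)) ≠ p := by
          intro he; rw [he, hple] at hqlen; omega
        have hpq : p.toList <+: (PySem.Str.slice s none (some ((n : Nat) : Int))).toList :=
          List.prefix_of_prefix_length_le hpre hqpre (by omega)
        exact hnp _ hx hqne hqnp hpq
      rw [hfn, hcont]
      simp

-- the no-match case: none of the four real prefixes matches s
theorem pv_nomatch (s : String)
    (h1 : PySem.Str.startswith s "https://doi.org/" = false)
    (h2 : PySem.Str.startswith s "http://doi.org/" = false)
    (h3 : PySem.Str.startswith s "doi:" = false)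
    (h4 : PySem.Str.startswith s "DOI:" = false) :
    (if PySem.Str.startswith s "10." then some s else none) = pvAltBody s := by
  unfold pvAltBody
  have h103 : ("10." : String).toList = ['1','0','.'] := by decide
  simp only [PySem.Str.find_eq, h103]
  by_cases hsw : PySem.Str.startswith s "10." = true
  · have hpre : ['1','0','.'] <+: s.toList := by
      have := (pv_sw_iff s "10.").mp hsw
      rw [h103] at this
      exact this
    have hfind : PySem.Chars.find s.toList ['1','0','.'] = (0 : Int) := by
      have := pv_find_first s.toList ['1','0','.'] 0 (by simpa using hpre) (by omega)
      simpa using this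
    rw [hfind]
    have htake : (PySem.Str.slice s none (some (0 : Int))).toList = [] := by
      simp [PySem.Str.toList_slice, PySem.List.slice, PySem.List.clampIdx]
    have hstr : PySem.Str.slice s none (some (0 : Int)) = "" := pv_toList_inj _ _ (by rw [htake]; rfl)
    have hfrom : PySem.Str.slice s (some (0 : Int)) none = s := by
      refine pv_toList_inj _ _ ?_
      simp [PySem.Str.toList_slice, PySem.List.slice, PySem.List.clampIdx]
    rw [hsw, if_pos rfl, hstr, hfrom]
    simp [pvDoiHeads]
  · have hsw' : PySem.Str.startswith s "10." = false := by simpa using hsw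
    rw [hsw']
    simp only [Bool.false_eq_true, if_false]
    by_cases hneg : PySem.Chars.find s.toList ['1','0','.'] < 0
    · rw [if_pos hneg]
    · rw [if_neg hneg]
      have hnn : 0 ≤ PySem.Chars.find s.toList ['1','0','.'] := by omega
      obtain ⟨hp0, _⟩ := PySem.Chars.find_spec (s := s.toList) (sub := ['1','0','.']) hnn
      set n := (PySem.Chars.find s.toList ['1','0','.']).toNat with hn
      have hfn : PySem.Chars.find s.toList ['1','0','.'] = (n : Int) := by omega
      have hnle : n ≤ s.toList.length := pv_len_le _ _ hp0
      have hn0 : n ≠ 0 := by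
        intro he
        apply hsw
        rw [pv_sw_iff, h103]
        rw [he] at hp0
        simpa using hp0
      have htake : (PySem.Str.slice s none (some ((n : Nat) : Int))).toList = s.toList.take n := by
        simp [PySem.Str.toList_slice, PySem.List.slice_to_natCast]
      have hcont : pvDoiHeads.contains (PySem.Str.slice s none (some ((n : Nat) : Int))) = false := by
        rw [Bool.eq_false_iff, Ne]
        intro h
        have hx : PySem.Str.slice s none (some ((n : Nat) : Int)) ∈ pvDoiHeads :=
          List.contains_iff_mem.mp h
        have hqlen : (PySem.Str.slice s none (some ((n : Nat) : Int))).toList.length = n := by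
          rw [htake, List.length_take]; omega
        have hqpre : (PySem.Str.slice s none (some ((n : Nat) : Int))).toList <+: s.toList := by
          rw [htake]; exact List.take_prefix _ _
        have hqsw : PySem.Str.startswith s (PySem.Str.slice s none (some ((n : Nat) : Int))) = true :=
          (pv_sw_iff s _).mpr hqpre
        simp only [pvDoiHeads, List.mem_cons, List.not_mem_nil, or_false] at hx
        rcases hx with h | h | h | h | h
        · rw [h] at hqlen
          simp at hqlen
          omega
        · rw [h] at hqsw; rw [hqsw] at h3; exact absurd h3 (by simp)
        · rw [h] at hqsw; rw [hqsw] at h4; exact absurd h4 (by simp)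
        · rw [h] at hqsw; rw [hqsw] at h2; exact absurd h2 (by simp)
        · rw [h] at hqsw; rw [hqsw] at h1; exact absurd h1 (by simp)
      rw [hfn, hcont]
      simp

theorem pv_core (s : String) :
    (if PySem.Str.startswith (pvStripFirst pvPrefixesA s) "10." then
        some (pvStripFirst pvPrefixesA s) else none) = pvAltBody s := by
  simp only [pvPrefixesA, pvStripFirst]
  by_cases g1 : PySem.Str.startswith s "https://doi.org/" = true
  · rw [if_pos g1]
    exact pv_matched s "https://doi.org/" (by decide) (by decide) (by decide) g1
  · have g1' : PySem.Str.startswith s "https://doi.org/" = false := by simpa using g1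
    rw [g1']
    simp only [Bool.false_eq_true, if_false]
    by_cases g2 : PySem.Str.startswith s "http://doi.org/" = true
    · rw [if_pos g2]
      exact pv_matched s "http://doi.org/" (by decide) (by decide) (by decide) g2
    · have g2' : PySem.Str.startswith s "http://doi.org/" = false := by simpa using g2
      rw [g2']
      simp only [Bool.false_eq_true, if_false]
      by_cases g3 : PySem.Str.startswith s "doi:" = true
      · rw [if_pos g3]
        exact pv_matched s "doi:" (by decide) (by decide) (by decide) g3
      · have g3' : PySem.Str.startswith s "doi:" = false := by simpa using g3
        rw [g3']
        simp only [Bool.false_eq_true, if_false]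
        by_cases g4 : PySem.Str.startswith s "DOI:" = true
        · rw [if_pos g4]
          exact pv_matched s "DOI:" (by decide) (by decide) (by decide) g4
        · have g4' : PySem.Str.startswith s "DOI:" = false := by simpa using g4
          rw [g4']
          simp only [Bool.false_eq_true, if_false]
          exact pv_nomatch s g1' g2' g3' g4'

-- ===== VERDICT (by name: the statement is the Claim_ definition above) =====
theorem clean_doi_py_spec : Claim_equal_clean_doi_py := by
  intro doi _
  unfold Spec_clean_doi_py clean_doi_py clean_doi_py_alt
  by_cases h : doi = ""
  · simp [h]
  · simp only [if_neg h]
    exact pv_core (PySem.Str.strip doi)
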